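-- pv_equiv track=rewrite | github.com/Haksell/n_puzzle | heuristics.py | __line_conflicts
-- ===== SOURCE A (Python) =====
-- def __get_ceil_index(arr, tail_indices, lo, hi, key):
--     while hi - lo > 1:
--         mi = lo + hi >> 1
--         if arr[tail_indices[mi]] <= key:
--             hi = mi
--         else:
--             lo = mi
--     return hi
--
-- def __longest_increasing_subsequence(a):
--     if len(a) <= 1:
--         return len(a)
--     a = list(reversed(a))
--     tail_indices = [0]
--     prev_indices = [-1] * (len(a) + 1)
--     for i in range(1, len(a)):
--         if a[i] > a[tail_indices[0]]:
--             tail_indices[0] = i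
--         elif a[i] < a[tail_indices[-1]]:
--             prev_indices[i] = tail_indices[-1]
--             tail_indices.append(i)
--         else:
--             pos = __get_ceil_index(a, tail_indices, -1, len(tail_indices) - 1, a[i])
--             prev_indices[i] = tail_indices[pos - 1]
--             tail_indices[pos] = i
--     res = 0
--     i = tail_indices[-1]
--     while i >= 0:
--         i = prev_indices[i]
--         res += 1
--     return res
--
-- def __line_conflicts(line_puzzle, line_goal):
--     common = set(line_puzzle) & set(line_goal)
--     common.discard(0)
--     line_puzzle = [n for n in line_puzzle if n in common]
--     line_goal = [n for n in line_goal if n in common]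
--     goal_pos = {n: i for i, n in enumerate(line_goal)}
--     perm = [goal_pos[n] for n in line_puzzle]
--     return len(perm) - __longest_increasing_subsequence(perm)
-- ===== SOURCE B (Python) =====
-- # Same preprocessing as the original; the patience-sorting LIS (and its
-- # binary-search helper) is replaced by a plain quadratic DP for the longest
-- # strictly increasing subsequence of perm.
-- def __line_conflicts(line_puzzle, line_goal):
--     common = set(line_puzzle) & set(line_goal)
--     common.discard(0)
--     line_puzzle = [n for n in line_puzzle if n in common]
--     line_goal = [n for n in line_goal if n in common]
--     goal_pos = {n: i for i, n in enumerate(line_goal)}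
--     perm = [goal_pos[n] for n in line_puzzle]
--     best = []
--     for x in perm:
--         best.append(1 + max([b for b, y in zip(best, perm) if y < x], default=0))
--     return len(perm) - max(best, default=0)
-- ===== Notes on version B (the rewrite author's own statement) =====
-- stated objective: simpler
-- what changed: The patience-sorting LIS with its binary-search ceil helper and prev-index chain is replaced by a plain quadratic dynamic program for the longest strictly increasing subsequence of perm; preprocessing is unchanged.
-- outside the precondition, e.g. on __line_conflicts([1, 1], [1]): A returns 0, B returns 1; on __line_conflicts([3, 3, 3, 1], [2, 1, 3]): A returns 1, B returns 3
import Mathlib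
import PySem

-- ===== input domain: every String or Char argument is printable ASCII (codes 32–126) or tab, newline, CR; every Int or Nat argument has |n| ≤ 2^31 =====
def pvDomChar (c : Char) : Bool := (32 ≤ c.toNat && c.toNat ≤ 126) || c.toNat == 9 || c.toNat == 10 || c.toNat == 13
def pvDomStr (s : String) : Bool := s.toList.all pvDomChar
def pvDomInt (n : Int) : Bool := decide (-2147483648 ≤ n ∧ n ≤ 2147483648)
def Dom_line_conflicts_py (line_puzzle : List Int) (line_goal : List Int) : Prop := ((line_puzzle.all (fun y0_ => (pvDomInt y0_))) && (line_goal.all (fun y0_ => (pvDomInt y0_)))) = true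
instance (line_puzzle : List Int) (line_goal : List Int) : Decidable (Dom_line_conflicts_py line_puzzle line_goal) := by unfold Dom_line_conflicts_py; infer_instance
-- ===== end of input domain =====

-- B replaces the patience-sorting LIS (binary-search ceil helper + prev-index chain) of A by a plain
-- quadratic dynamic program for the longest strictly increasing subsequence of perm (objective: simpler).

-- ===== PORT A =====
-- xs[i] for an index that is in range on every reachable state (the .getD 0 default is never read there)
def pvIdx (xs : List Int) (i : Int) : Int := PySem.List.pyGetD xs i 0

-- literal port of __get_ceil_index; 'lo + hi >> 1' is floor((lo+hi)/2) on Python ints, exact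
def getCeilIndexA (arr : List Int) (tails : List Int) (lo hi : Int) (key : Int) : Int :=
  if hi - lo > 1 then
    if pvIdx arr (pvIdx tails (PySem.Int.floordiv (lo + hi) 2)) ≤ key then
      getCeilIndexA arr tails lo (PySem.Int.floordiv (lo + hi) 2) key
    else
      getCeilIndexA arr tails (PySem.Int.floordiv (lo + hi) 2) hi key
  else hi
termination_by (hi - lo).toNat
decreasing_by
  · rw [PySem.Int.floordiv_eq_ediv_of_pos (by norm_num)] at *; omega
  · rw [PySem.Int.floordiv_eq_ediv_of_pos (by norm_num)] at *; omega

-- the final 'while i >= 0' counting loop of __longest_increasing_subsequence;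
-- fuel bounds the loop and is exact: prev[x] < x on every state the algorithm builds,
-- so the chain from any start < n ends within n+1 steps (proved in the lemmas below)
def chainCountA (prev : List Int) : Nat → Int → Int
  | 0, _ => 0
  | f + 1, i => if 0 ≤ i then chainCountA prev f (pvIdx prev i) + 1 else 0

-- body of the 'for i in range(1, len(a))' loop of __longest_increasing_subsequence
def lisStepA (a : List Int) (st : List Int × List Int) (i : Int) : List Int × List Int :=
  if pvIdx a i > pvIdx a (pvIdx st.1 0) then
    (PySem.List.pySetD st.1 0 i, st.2)
  else if pvIdx a i < pvIdx a (pvIdx st.1 (-1)) then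
    (st.1 ++ [i], PySem.List.pySetD st.2 i (pvIdx st.1 (-1)))
  else
    let pos := getCeilIndexA a st.1 (-1) ((st.1.length : Int) - 1) (pvIdx a i)
    (PySem.List.pySetD st.1 pos i, PySem.List.pySetD st.2 i (pvIdx st.1 (pos - 1)))

-- literal port of __longest_increasing_subsequence
def lisPatienceA (a0 : List Int) : Int :=
  if a0.length ≤ 1 then (a0.length : Int) else
  let a := a0.reverse
  let st := (PySem.List.pyRange 1 (a.length : Int)).foldl (lisStepA a)
      ([(0 : Int)], List.replicate (a.length + 1) (-1 : Int))
  chainCountA st.2 st.2.length (pvIdx st.1 (-1))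

-- literal port of __line_conflicts
def line_conflicts_py (line_puzzle : List Int) (line_goal : List Int) : Int :=
  let common := PySem.Set.discard (PySem.Set.inter (PySem.Set.ofList line_puzzle) (PySem.Set.ofList line_goal)) 0
  let lp := line_puzzle.filter (fun n => PySem.Set.contains common n)
  let lg := line_goal.filter (fun n => PySem.Set.contains common n)
  let goal_pos := (PySem.List.enumerate lg 0).foldl (fun d p => d.insert p.2 p.1) (PySem.Dict.empty)
  -- goal_pos[n]: the KeyError default is never read, every n ∈ lp occurs in lg
  let perm := lp.map (fun n => (PySem.Dict.get? goal_pos n).getD 0)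
  (perm.length : Int) - lisPatienceA perm

-- ===== PORT B =====
-- body of the 'for x in perm' DP loop of Source B
def dpStepB (perm : List Int) (best : List Int) (x : Int) : List Int :=
  best ++ [1 + (PySem.List.max? (((best.zip perm).filter (fun p => decide (p.2 < x))).map (fun p => p.1)) (fun y => y)).getD 0]

def line_conflicts_py_alt (line_puzzle : List Int) (line_goal : List Int) : Int :=
  let common := PySem.Set.discard (PySem.Set.inter (PySem.Set.ofList line_puzzle) (PySem.Set.ofList line_goal)) 0
  let lp := line_puzzle.filter (fun n => PySem.Set.contains common n)
  let lg := line_goal.filter (fun n => PySem.Set.contains common n)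
  let goal_pos := (PySem.List.enumerate lg 0).foldl (fun d p => d.insert p.2 p.1) (PySem.Dict.empty)
  let perm := lp.map (fun n => (PySem.Dict.get? goal_pos n).getD 0)
  let best := perm.foldl (dpStepB perm) []
  (perm.length : Int) - (PySem.List.max? best (fun y => y)).getD 0

-- ===== PRECONDITION & SPEC =====
-- Pre_ excludes inputs in which some common (nonzero, also-in-goal) tile repeats in line_puzzle: perm then has
-- equal entries and A's patience LIS breaks the ties by an accidental mixture of strict and non-strict
-- comparisons (including a negative-index wraparound), a value no specification pins down; B's strict-LIS
-- value on such ties is the other defensible choice.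
def Pre_line_conflicts_py (line_puzzle : List Int) (line_goal : List Int) : Prop :=
  (line_puzzle.filter (fun n => decide (n ≠ 0 ∧ n ∈ line_goal))).Nodup
instance (line_puzzle : List Int) (line_goal : List Int) : Decidable (Pre_line_conflicts_py line_puzzle line_goal) := by unfold Pre_line_conflicts_py; infer_instance

def pvWitness_line_conflicts_py : List Int × List Int := ([2, 1, 3], [1, 2, 3])

def Spec_line_conflicts_py (line_puzzle : List Int) (line_goal : List Int) (out : Int) : Prop := out = line_conflicts_py_alt line_puzzle line_goal
instance (line_puzzle : List Int) (line_goal : List Int) (out : Int) : Decidable (Spec_line_conflicts_py line_puzzle line_goal out) := by unfold Spec_line_conflicts_py; infer_instance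

-- ===== CLAIM (what is proved, stated in full; the proofs are below) =====
def Claim_equal_line_conflicts_py : Prop := ∀ (line_puzzle : List Int) (line_goal : List Int), Dom_line_conflicts_py line_puzzle line_goal → Pre_line_conflicts_py line_puzzle line_goal → Spec_line_conflicts_py line_puzzle line_goal (line_conflicts_py line_puzzle line_goal)

-- ===== LEMMAS AND PROOFS =====

-- ---------- generic: maximum of a list of naturals ----------
def natMax : List Nat → Nat
  | [] => 0
  | a :: t => max a (natMax t)

theorem le_natMax {a : Nat} {l : List Nat} (h : a ∈ l) : a ≤ natMax l := by
  induction l with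
  | nil => cases h
  | cons b t ih =>
    rcases List.mem_cons.mp h with rfl | h
    · simp [natMax]
    · have := ih h; simp [natMax]; omega

theorem natMax_attain (l : List Nat) : natMax l = 0 ∨ natMax l ∈ l := by
  induction l with
  | nil => left; rfl
  | cons b t ih =>
    rcases ih with h | h <;> simp [natMax, Nat.max_def] <;> split <;> simp_all

-- ---------- strict chains as a Bool test (for filtering sublists) ----------
def gtChainB : List Int → Bool
  | [] => true
  | [_] => true
  | a :: b :: t => decide (a > b) && gtChainB (b :: t)

theorem gtChainB_iff : ∀ (l : List Int), gtChainB l = true ↔ l.IsChain (· > ·)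
  | [] => by simp [gtChainB]
  | [a] => by simp [gtChainB]
  | a :: b :: t => by
    rw [List.isChain_cons_cons, ← gtChainB_iff (b :: t)]
    simp [gtChainB]

-- length of the longest strictly decreasing subsequence
def LDS (r : List Int) : Nat := natMax ((r.sublists.filter gtChainB).map List.length)

def ltChainB : List Int → Bool
  | [] => true
  | [_] => true
  | a :: b :: t => decide (a < b) && ltChainB (b :: t)

theorem ltChainB_iff : ∀ (l : List Int), ltChainB l = true ↔ l.IsChain (· < ·)
  | [] => by simp [ltChainB]
  | [a] => by simp [ltChainB]
  | a :: b :: t => by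
    rw [List.isChain_cons_cons, ← ltChainB_iff (b :: t)]
    simp [ltChainB]

-- length of the longest strictly increasing subsequence
def LIS (p : List Int) : Nat := natMax ((p.sublists.filter ltChainB).map List.length)

theorem length_le_LDS {l r : List Int} (h : l.Sublist r) (hc : l.IsChain (· > ·)) : l.length ≤ LDS r := by
  apply le_natMax
  exact List.mem_map_of_mem (List.mem_filter.mpr ⟨List.mem_sublists.mpr h, (gtChainB_iff l).mpr hc⟩)

theorem LDS_attain (r : List Int) : ∃ l : List Int, l.Sublist r ∧ l.IsChain (· > ·) ∧ l.length = LDS r := by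
  rcases natMax_attain ((r.sublists.filter gtChainB).map List.length) with h | h
  · exact ⟨[], List.nil_sublist r, List.isChain_nil, h.symm⟩
  · obtain ⟨l, hl, hlen⟩ := List.mem_map.mp h
    obtain ⟨hs, hch⟩ := List.mem_filter.mp hl
    exact ⟨l, List.mem_sublists.mp hs, (gtChainB_iff l).mp hch, hlen⟩

theorem length_le_LIS {l p : List Int} (h : l.Sublist p) (hc : l.IsChain (· < ·)) : l.length ≤ LIS p := by
  apply le_natMax
  exact List.mem_map_of_mem (List.mem_filter.mpr ⟨List.mem_sublists.mpr h, (ltChainB_iff l).mpr hc⟩)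

theorem LIS_attain (p : List Int) : ∃ l : List Int, l.Sublist p ∧ l.IsChain (· < ·) ∧ l.length = LIS p := by
  rcases natMax_attain ((p.sublists.filter ltChainB).map List.length) with h | h
  · exact ⟨[], List.nil_sublist p, List.isChain_nil, h.symm⟩
  · obtain ⟨l, hl, hlen⟩ := List.mem_map.mp h
    obtain ⟨hs, hch⟩ := List.mem_filter.mp hl
    exact ⟨l, List.mem_sublists.mp hs, (ltChainB_iff l).mp hch, hlen⟩

theorem chain_lt_reverse {l : List Int} (h : l.IsChain (· < ·)) : l.reverse.IsChain (· > ·) := by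
  rw [List.isChain_reverse]; exact h.imp_of_mem_imp (fun _ _ _ _ h => h)

theorem chain_gt_reverse {l : List Int} (h : l.IsChain (· > ·)) : l.reverse.IsChain (· < ·) := by
  rw [List.isChain_reverse]; exact h.imp_of_mem_imp (fun _ _ _ _ h => h)

theorem LIS_eq_LDS_reverse (p : List Int) : LIS p = LDS p.reverse := by
  apply le_antisymm
  · obtain ⟨l, hs, hc, hlen⟩ := LIS_attain p
    calc LIS p = l.reverse.length := by simp [hlen]
    _ ≤ LDS p.reverse := length_le_LDS hs.reverse (chain_lt_reverse hc)
  · obtain ⟨l, hs, hc, hlen⟩ := LDS_attain p.reverse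
    calc LDS p.reverse = l.reverse.length := by simp [hlen]
    _ ≤ LIS p := length_le_LIS (by simpa using hs.reverse) (chain_gt_reverse hc)

-- a sublist ending in x sits below an occurrence of x
theorem sublist_concat_decomp {l m : List Int} {x : Int} (h : (l ++ [x]).Sublist m) :
    ∃ j : Nat, ∃ hj : j < m.length, m[j] = x ∧ l.Sublist (m.take j) := by
  induction m generalizing l with
  | nil => simp at h
  | cons y m' ih =>
    rcases List.sublist_cons_iff.mp h with h' | ⟨r', he, hr⟩
    · obtain ⟨j, hj, hx, hl⟩ := ih h'
      exact ⟨j + 1, by simpa using hj, by simpa using hx, by simpa using hl.cons y⟩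
    · cases l with
      | nil =>
        simp at he
        exact ⟨0, by simp, by simp [he.1.symm], by simp⟩
      | cons a l' =>
        simp only [List.cons_append, List.cons.injEq] at he
        obtain ⟨rfl, he2⟩ := he
        obtain ⟨j, hj, hx, hl⟩ := ih (he2 ▸ hr)
        exact ⟨j + 1, by simpa using hj, by simpa using hx, by simpa using hl.cons₂ a⟩

-- ---------- A side: the patience-sorting invariant ----------
theorem pvIdx_eq_getElem {xs : List Int} {t : Int} (h0 : 0 ≤ t) (h1 : t < xs.length) :
    pvIdx xs t = xs[t.toNat]'(by omega) := by
  simp [pvIdx, PySem.List.pyGetD, PySem.List.pyGet?_of_nonneg xs h0,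
    List.getElem?_eq_getElem (show t.toNat < xs.length by omega)]

theorem length_pySetD (xs : List Int) (i : Int) (v : Int) : (PySem.List.pySetD xs i v).length = xs.length := by
  cases h : PySem.List.pyIdx? xs.length i <;> simp [PySem.List.pySetD, PySem.List.pySet?, h]

theorem pvIdx_pySetD {xs : List Int} {i : Int} (h0 : 0 ≤ i) (h1 : i < xs.length) (v y : Int) (hy : 0 ≤ y) :
    pvIdx (PySem.List.pySetD xs i v) y = if y = i then v else pvIdx xs y := by
  have hv := PySem.List.pyGetD_pySetD_natCast xs i.toNat y.toNat v 0 (by omega)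
  rw [Int.toNat_of_nonneg h0, Int.toNat_of_nonneg hy] at hv
  simp only [pvIdx, hv]
  congr 1
  simp only [eq_iff_iff]
  omega

-- value stored at position j of tails
def vA (r tails : List Int) (j : Nat) : Int := pvIdx r (tails.getD j 0)

def InvA (r : List Int) (i : Nat) (st : List Int × List Int) : Prop :=
  1 ≤ st.1.length ∧
  (∀ j : Nat, j < st.1.length → 0 ≤ st.1.getD j 0 ∧ st.1.getD j 0 < (i : Int)) ∧
  (∀ j1 j2 : Nat, j1 < j2 → j2 < st.1.length → vA r st.1 j1 > vA r st.1 j2) ∧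
  (∀ j : Nat, j < st.1.length →
    ∃ l : List Int, l.Sublist (r.take i) ∧ l.IsChain (· > ·) ∧ l.length = j + 1 ∧ l.getLast? = some (vA r st.1 j)) ∧
  (∀ l : List Int, l.Sublist (r.take i) → l.IsChain (· > ·) → l ≠ [] →
    l.length ≤ st.1.length ∧ ∀ w : Int, l.getLast? = some w → w ≤ vA r st.1 (l.length - 1)) ∧
  st.2.length = r.length + 1 ∧
  (∀ y : Int, 0 ≤ y → pvIdx st.2 y < y) ∧
  (∀ y : Int, (i : Int) ≤ y → y < (st.2.length : Int) → pvIdx st.2 y < 0) ∧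
  (∀ j : Nat, j < st.1.length → ∀ f : Nat, i < f → chainCountA st.2 f (st.1.getD j 0) = (j : Int) + 1)

theorem pySetD_eq_set {xs : List Int} {i : Int} (h0 : 0 ≤ i) (h1 : i < xs.length) (v : Int) :
    PySem.List.pySetD xs i v = xs.set i.toNat v := by
  have : PySem.List.pyIdx? xs.length i = some i.toNat := by
    unfold PySem.List.pyIdx?
    split_ifs <;> first | rfl | omega
  simp [PySem.List.pySetD, PySem.List.pySet?, this]

theorem pvIdx_nonneg_getD {xs : List Int} {j : Int} (h0 : 0 ≤ j) (h1 : j < xs.length) :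
    pvIdx xs j = xs.getD j.toNat 0 := by
  rw [pvIdx_eq_getElem h0 h1, List.getD_eq_getElem _ _ (by omega)]

theorem pvIdx_neg_one {xs : List Int} (h : xs ≠ []) : pvIdx xs (-1) = xs.getD (xs.length - 1) 0 := by
  have hpos := List.length_pos_iff.mpr h
  simp only [pvIdx, PySem.List.pyGetD, PySem.List.pyGet?_neg_one]
  rw [List.getLast?_eq_some_getLast h, Option.getD_some, List.getLast_eq_getElem,
    List.getD_eq_getElem _ _ (by omega)]

theorem chainCountA_neg {prev : List Int} {x : Int} (h : x < 0) (f : Nat) : chainCountA prev f x = 0 := by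
  cases f <;> simp [chainCountA, show ¬ (0 ≤ x) by omega]

theorem pvIdx_oob {xs : List Int} {y : Int} (h : (xs.length : Int) ≤ y) : pvIdx xs y = 0 := by
  have : PySem.List.pyGet? xs y = none := by
    rw [PySem.List.pyGet?_eq_none_iff]
    unfold PySem.Raise.InRange
    omega
  simp [pvIdx, PySem.List.pyGetD, this]

theorem pvIdx_replicate {m : Nat} {y : Int} (h0 : 0 ≤ y) (h1 : y < (m : Int)) :
    pvIdx (List.replicate m (-1 : Int)) y = -1 := by
  rw [pvIdx_eq_getElem h0 (by simpa using h1)]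
  simp

theorem sublist_concat_cases {l m : List Int} {x : Int} (h : l.Sublist (m ++ [x])) :
    l.Sublist m ∨ ∃ l' : List Int, l = l' ++ [x] ∧ l'.Sublist m := by
  obtain ⟨l1, l2, rfl, h1, h2⟩ := List.sublist_append_iff.mp h
  rcases List.sublist_singleton.mp h2 with rfl | rfl
  · left; simpa using h1
  · right; exact ⟨l1, rfl, h1⟩

theorem chainCountA_congr {p1 p2 : List Int} {i : Int}
    (hagree : ∀ y : Int, 0 ≤ y → y < i → pvIdx p1 y = pvIdx p2 y)
    (hwf : ∀ y : Int, 0 ≤ y → pvIdx p1 y < y) :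
    ∀ (f : Nat) (x : Int), x < i → chainCountA p1 f x = chainCountA p2 f x := by
  intro f
  induction f with
  | zero => intro x _; rfl
  | succ f ih =>
    intro x hx
    by_cases h0 : 0 ≤ x
    · have hag := hagree x h0 hx
      have hrec := ih (pvIdx p1 x) (lt_trans (hwf x h0) hx)
      simp only [chainCountA, if_pos h0, ← hag, hrec]
    · simp [chainCountA, h0]

theorem ceil_spec (r tails : List Int) (key : Int) :
    ∀ (fuel : Nat) (lo hi : Int), (hi - lo).toNat ≤ fuel → -1 ≤ lo → lo < hi → hi < (tails.length : Int) →
    (0 ≤ lo → pvIdx r (pvIdx tails lo) > key) →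
    pvIdx r (pvIdx tails hi) ≤ key →
    lo < getCeilIndexA r tails lo hi key ∧ getCeilIndexA r tails lo hi key ≤ hi ∧
    pvIdx r (pvIdx tails (getCeilIndexA r tails lo hi key)) ≤ key ∧
    (0 ≤ getCeilIndexA r tails lo hi key - 1 →
      pvIdx r (pvIdx tails (getCeilIndexA r tails lo hi key - 1)) > key) := by
  intro fuel
  induction fuel with
  | zero => intro lo hi h0 _ hlh _ _ _; omega
  | succ f ih =>
    intro lo hi h0 hlo1 hlh hhi hplo hphi
    rw [getCeilIndexA]
    by_cases hgt : hi - lo > 1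
    · have hmi : lo < PySem.Int.floordiv (lo + hi) 2 ∧ PySem.Int.floordiv (lo + hi) 2 < hi := by
        rw [PySem.Int.floordiv_eq_ediv_of_pos (by norm_num)]
        omega
      rw [if_pos hgt]
      by_cases hc : pvIdx r (pvIdx tails (PySem.Int.floordiv (lo + hi) 2)) ≤ key
      · rw [if_pos hc]
        obtain ⟨c1, c2, c3, c4⟩ := ih lo (PySem.Int.floordiv (lo + hi) 2) (by omega) hlo1
          (by omega) (by omega) hplo hc
        exact ⟨c1, by omega, c3, c4⟩
      · rw [if_neg hc]
        obtain ⟨c1, c2, c3, c4⟩ := ih (PySem.Int.floordiv (lo + hi) 2) hi (by omega) (by omega)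
          (by omega) hhi (fun _ => by omega) hphi
        exact ⟨by omega, c2, c3, c4⟩
    · rw [if_neg hgt]
      refine ⟨hlh, le_refl _, hphi, ?_⟩
      intro hge
      have heq : hi - 1 = lo := by omega
      rw [heq]
      exact hplo (by omega)

theorem getD_set_eq {xs : List Int} (n : Nat) (v : Int) (j : Nat) (hj : j < xs.length) :
    (xs.set n v).getD j 0 = if n = j then v else xs.getD j 0 := by
  rw [List.getD_eq_getElem _ _ (by simpa using hj), List.getElem_set]
  split
  · rfl
  · rw [List.getD_eq_getElem _ _ hj]

theorem stepA_preserves (r : List Int) (hnd : r.Nodup) (i : Nat) (h1 : 1 ≤ i) (hi : i < r.length)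
    (st : List Int × List Int) (hInv : InvA r i st) : InvA r (i + 1) (lisStepA r st (i : Int)) := by
  obtain ⟨tails, prev⟩ := st
  obtain ⟨hk1, hbd, hmono, hreal, hmax, hplen, hwf, hfresh, hchain⟩ := hInv
  simp only at hk1 hbd hmono hreal hmax hplen hwf hfresh hchain
  have hne : tails ≠ [] := by
    intro h; rw [h] at hk1; simp at hk1
  have hXr : pvIdx r (i : Int) = r[i] := by
    rw [pvIdx_eq_getElem (by positivity) (by exact_mod_cast hi)]
    simp
  have hvj : ∀ j : Nat, (hj : j < tails.length) → vA r tails j = r[(tails.getD j 0).toNat]'(by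
      obtain ⟨hb0, hb1⟩ := hbd j hj; omega) := by
    intro j hj
    obtain ⟨hb0, hb1⟩ := hbd j hj
    rw [vA, pvIdx_eq_getElem hb0 (by push_cast; omega)]
  have hvneq : ∀ j : Nat, j < tails.length → vA r tails j ≠ pvIdx r (i : Int) := by
    intro j hj heq
    obtain ⟨hb0, hb1⟩ := hbd j hj
    rw [hvj j hj, hXr] at heq
    have := (List.Nodup.getElem_inj_iff hnd).mp heq
    omega
  have htake : r.take (i + 1) = r.take i ++ [r[i]] := by
    rw [List.take_add_one]
    simp [List.getElem?_eq_getElem hi]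
  have hv0 : pvIdx r (pvIdx tails 0) = vA r tails 0 := by
    rw [vA]
    congr 1
    rw [pvIdx_nonneg_getD (by norm_num) (by exact_mod_cast hk1)]
    simp
  have hvlast : pvIdx r (pvIdx tails (-1)) = vA r tails (tails.length - 1) := by
    rw [vA, pvIdx_neg_one hne]
  rw [lisStepA]
  simp only
  by_cases hc1 : pvIdx r (i : Int) > pvIdx r (pvIdx tails 0)
  · -- branch 1: replace tails[0]
    rw [if_pos hc1, hv0] at *
    rw [pySetD_eq_set (by norm_num) (by exact_mod_cast hk1)]
    simp only [Int.toNat_zero]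
    have hT : ∀ j : Nat, j < tails.length → (tails.set 0 (i : Int)).getD j 0 =
        if j = 0 then (i : Int) else tails.getD j 0 := by
      intro j hj
      rw [getD_set_eq 0 _ j hj]
      split <;> split <;> first | rfl | omega
    have hTv : ∀ j : Nat, j < tails.length → vA r (tails.set 0 (i : Int)) j =
        if j = 0 then pvIdx r (i : Int) else vA r tails j := by
      intro j hj
      rw [vA, hT j hj]
      split
      · rfl
      · rfl
    refine ⟨?_, ?_, ?_, ?_, ?_, ?_, ?_, ?_, ?_⟩
    · simpa using hk1
    · intro j hj
      simp only [List.length_set] at hj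
      rw [hT j hj]
      split
      · constructor <;> [positivity; push_cast] <;> omega
      · obtain ⟨a, b⟩ := hbd j hj
        constructor
        · exact a
        · push_cast; omega
    · intro j1 j2 h12 hj2
      simp only [List.length_set] at hj2
      rw [hTv j1 (by omega), hTv j2 (by omega), if_neg (show ¬ j2 = 0 by omega)]
      by_cases hj10 : j1 = 0
      · rw [if_pos hj10]
        subst hj10
        exact lt_trans (hmono 0 j2 (by omega) hj2) hc1
      · rw [if_neg hj10]
        exact hmono j1 j2 h12 hj2
    · intro j hj
      simp only [List.length_set] at hj
      rw [hTv j hj]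
      by_cases hj0 : j = 0
      · subst hj0
        refine ⟨[r[i]], ?_, List.isChain_singleton _, by simp, by simp [hXr]⟩
        rw [htake]
        exact List.Sublist.append (List.nil_sublist _) (List.Sublist.refl _)
      · rw [if_neg hj0]
        obtain ⟨l, hs, hcl, hlen, hlast⟩ := hreal j hj
        exact ⟨l, hs.trans (by rw [htake]; exact List.sublist_append_left _ _), hcl, hlen, hlast⟩
    · intro l hl hcl hlne
      rw [htake] at hl
      rcases sublist_concat_cases hl with hold | ⟨l', rfl, hl'⟩
      · obtain ⟨ha, hb⟩ := hmax l hold hcl hlne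
        have hlpos : 1 ≤ l.length := List.length_pos_iff.mpr hlne
        refine ⟨by simpa using ha, ?_⟩
        intro w hw
        have hwle := hb w hw
        rw [hTv (l.length - 1) (by omega)]
        split
        · calc w ≤ vA r tails (l.length - 1) := hwle
          _ = vA r tails 0 := by rw [(by omega : l.length - 1 = 0)]
          _ ≤ pvIdx r (i : Int) := le_of_lt hc1
        · exact hwle
      · have hl'nil : l' = [] := by
          by_contra hne'
          have hsp := List.isChain_append.mp hcl
          obtain ⟨hchl', -, hrel⟩ := hsp
          have hlast' := List.getLast?_eq_some_getLast hne'
          have hgt : l'.getLast hne' > r[i] :=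
            hrel _ (by rw [hlast']; rfl) _ (by rfl)
          obtain ⟨hle', hb'⟩ := hmax l' hl' hchl' hne'
          have hl'pos : 1 ≤ l'.length := List.length_pos_iff.mpr hne'
          have hwle := hb' _ hlast'
          have hva : vA r tails (l'.length - 1) ≤ vA r tails 0 := by
            by_cases h0 : l'.length - 1 = 0
            · rw [h0]
            · exact le_of_lt (hmono 0 (l'.length - 1) (by omega) (by omega))
          rw [hXr] at hc1
          omega
        subst hl'nil
        simp only [List.nil_append]
        refine ⟨by simpa using hk1, ?_⟩
        intro w hw
        simp only [List.length_cons, List.length_nil] at *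
        rw [hTv 0 (by omega), if_pos rfl]
        simp only [List.getLast?_singleton, Option.some_inj] at hw
        rw [← hw, hXr]
    · exact hplen
    · exact hwf
    · intro y hy1 hy2
      exact hfresh y (by push_cast at hy1 ⊢; omega) hy2
    · intro j hj f hf
      simp only [List.length_set] at hj
      rw [hT j hj]
      by_cases hj0 : j = 0
      · subst hj0
        rw [if_pos rfl]
        obtain ⟨f', rfl⟩ : ∃ f', f = f' + 1 := ⟨f - 1, by omega⟩
        have hneg : pvIdx prev (i : Int) < 0 := hfresh (i : Int) (le_refl _) (by push_cast; omega)
        simp [chainCountA, show (0:Int) ≤ (i : Int) by positivity, chainCountA_neg hneg]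
      · rw [if_neg hj0]
        exact hchain j hj f (by omega)
  · rw [if_neg hc1]
    have hXlt0 : pvIdx r (i : Int) < vA r tails 0 := by
      have hle : pvIdx r (i : Int) ≤ vA r tails 0 := by rw [← hv0]; exact not_lt.mp hc1
      exact lt_of_le_of_ne hle (fun h => hvneq 0 (by omega) h.symm)
    have hklen : tails.length - 1 < tails.length := by omega
    have htlast : pvIdx tails (-1) = tails.getD (tails.length - 1) 0 := pvIdx_neg_one hne
    obtain ⟨hlb0, hlb1⟩ := hbd (tails.length - 1) hklen
    have hprevlen : (i : Int) < prev.length := by push_cast [hplen]; omega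
    have hpv : ∀ (v y : Int), 0 ≤ y →
        pvIdx (PySem.List.pySetD prev (i : Int) v) y = if y = (i : Int) then v else pvIdx prev y :=
      fun v y hy => pvIdx_pySetD (by positivity) hprevlen v y hy
    have hagree : ∀ (v : Int), ∀ y : Int, 0 ≤ y → y < (i : Int) →
        pvIdx prev y = pvIdx (PySem.List.pySetD prev (i : Int) v) y := by
      intro v y hy0 hyi
      rw [hpv v y hy0, if_neg (by omega)]
    by_cases hc2 : pvIdx r (i : Int) < pvIdx r (pvIdx tails (-1))
    · -- branch 2: append a new pile
      rw [if_pos hc2]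
      rw [hvlast] at hc2
      have hT : ∀ j : Nat, j < tails.length → (tails ++ [(i : Int)]).getD j 0 = tails.getD j 0 :=
        fun j hj => List.getD_append _ _ _ _ hj
      have hTlast : (tails ++ [(i : Int)]).getD tails.length 0 = (i : Int) := by
        rw [List.getD_eq_getElem _ _ (by simp), List.getElem_append_right (le_refl _)]
        simp
      have hTv : ∀ j : Nat, j < tails.length → vA r (tails ++ [(i : Int)]) j = vA r tails j := by
        intro j hj; rw [vA, hT j hj]; rfl
      have hTvlast : vA r (tails ++ [(i : Int)]) tails.length = pvIdx r (i : Int) := by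
        rw [vA, hTlast]
      have hvge : ∀ j : Nat, j < tails.length → vA r tails j > pvIdx r (i : Int) := by
        intro j hj
        rcases eq_or_lt_of_le (show j ≤ tails.length - 1 by omega) with h | h
        · rw [h]; exact hc2
        · exact lt_trans hc2 (hmono j (tails.length - 1) (by omega) hklen)
      refine ⟨?_, ?_, ?_, ?_, ?_, ?_, ?_, ?_, ?_⟩
      · simp
      · intro j hj
        simp only [List.length_append, List.length_cons, List.length_nil] at hj
        by_cases hjk : j < tails.length
        · rw [hT j hjk]
          obtain ⟨a, b⟩ := hbd j hjk
          exact ⟨a, by push_cast; omega⟩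
        · have : j = tails.length := by omega
          subst this
          rw [hTlast]
          constructor
          · positivity
          · push_cast; omega
      · intro j1 j2 h12 hj2
        simp only [List.length_append, List.length_cons, List.length_nil] at hj2
        by_cases hjk : j2 < tails.length
        · rw [hTv j1 (by omega), hTv j2 hjk]
          exact hmono j1 j2 h12 hjk
        · have : j2 = tails.length := by omega
          subst this
          rw [hTv j1 (by omega), hTvlast]
          exact hvge j1 (by omega)
      · intro j hj
        simp only [List.length_append, List.length_cons, List.length_nil] at hj
        by_cases hjk : j < tails.length
        · rw [hTv j hjk]
          obtain ⟨l, hs, hcl, hlen, hlast⟩ := hreal j hjk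
          exact ⟨l, hs.trans (by rw [htake]; exact List.sublist_append_left _ _), hcl, hlen, hlast⟩
        · have : j = tails.length := by omega
          subst this
          rw [hTvlast]
          obtain ⟨l, hs, hcl, hlen, hlast⟩ := hreal (tails.length - 1) hklen
          refine ⟨l ++ [r[i]], ?_, ?_, ?_, ?_⟩
          · rw [htake]; exact List.Sublist.append hs (List.Sublist.refl _)
          · rw [List.isChain_append]
            refine ⟨hcl, List.isChain_singleton _, ?_⟩
            intro a ha b hb
            rw [hlast] at ha
            simp only [List.head?_cons, Option.mem_some_iff] at ha hb
            subst ha; subst hb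
            rw [← hXr]
            exact hc2
          · simp [hlen]; omega
          · rw [List.getLast?_concat, hXr]
      · intro l hl hcl hlne
        rw [htake] at hl
        rcases sublist_concat_cases hl with hold | ⟨l', rfl, hl'⟩
        · obtain ⟨ha, hb⟩ := hmax l hold hcl hlne
          have hlpos : 1 ≤ l.length := List.length_pos_iff.mpr hlne
          refine ⟨by simp; omega, ?_⟩
          intro w hw
          rw [hTv (l.length - 1) (by omega)]
          exact hb w hw
        · have hsp := List.isChain_append.mp hcl
          obtain ⟨hchl', -, hrel⟩ := hsp
          by_cases hne' : l' = []
          · subst hne'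
            simp only [List.nil_append, List.length_cons, List.length_nil]
            refine ⟨by simp, ?_⟩
            intro w hw
            simp only [List.getLast?_singleton, Option.some_inj] at hw
            rw [hTv 0 (by omega), ← hw, ← hXr]
            exact le_of_lt hXlt0
          · have hlast' := List.getLast?_eq_some_getLast hne'
            have hgt : l'.getLast hne' > r[i] :=
              hrel _ (by rw [hlast']; rfl) _ (by rfl)
            obtain ⟨hle', hb'⟩ := hmax l' hl' hchl' hne'
            have hl'pos : 1 ≤ l'.length := List.length_pos_iff.mpr hne'
            refine ⟨by simp; omega, ?_⟩
            intro w hw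
            rw [List.getLast?_concat] at hw
            have hw' : w = r[i] := by simpa using hw.symm
            subst hw'
            simp only [List.length_append, List.length_cons, List.length_nil]
            by_cases hmk : l'.length < tails.length
            · rw [(show l'.length + 1 - 1 = l'.length by omega), hTv l'.length hmk]
              rw [← hXr]
              exact le_of_lt (hvge l'.length hmk)
            · have : l'.length = tails.length := by omega
              rw [(show l'.length + 1 - 1 = l'.length by omega), this, hTvlast, hXr]
      · rw [length_pySetD]; exact hplen
      · intro y hy
        rw [hpv _ y hy]
        split
        · rename_i h; rw [h, htlast]; exact hlb1
        · exact hwf y hy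
      · intro y hy1 hy2
        rw [length_pySetD] at hy2
        rw [hpv _ y (by push_cast at hy1 ⊢; omega), if_neg (by push_cast at hy1 ⊢; omega)]
        exact hfresh y (by push_cast at hy1 ⊢; omega) hy2
      · intro j hj f hf
        simp only [List.length_append, List.length_cons, List.length_nil] at hj
        by_cases hjk : j < tails.length
        · rw [hT j hjk]
          obtain ⟨a, b⟩ := hbd j hjk
          rw [← chainCountA_congr (hagree _) hwf f _ b]
          exact hchain j hjk f (by omega)
        · have : j = tails.length := by omega
          subst this
          rw [hTlast]
          obtain ⟨f', rfl⟩ : ∃ f', f = f' + 1 := ⟨f - 1, by omega⟩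
          have hstep : chainCountA (PySem.List.pySetD prev (i : Int) (pvIdx tails (-1))) (f' + 1) (i : Int) =
              chainCountA (PySem.List.pySetD prev (i : Int) (pvIdx tails (-1))) f' (pvIdx (PySem.List.pySetD prev (i : Int) (pvIdx tails (-1))) (i : Int)) + 1 := by
            simp [chainCountA, show (0:Int) ≤ (i : Int) by positivity]
          rw [hstep, hpv _ _ (by positivity), if_pos rfl, htlast]
          rw [← chainCountA_congr (hagree _) hwf f' _ hlb1]
          rw [hchain (tails.length - 1) hklen f' (by omega)]
          push_cast
          omega
    · -- branch 3: binary search for the pile to improve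
      rw [if_neg hc2]
      rw [hvlast] at hc2
      have hXgtl : pvIdx r (i : Int) > vA r tails (tails.length - 1) :=
        lt_of_le_of_ne (not_lt.mp hc2) (hvneq (tails.length - 1) hklen)
      have hposA : ∀ (q : Int), 0 ≤ q → q < (tails.length : Int) →
          pvIdx r (pvIdx tails q) = vA r tails q.toNat := by
        intro q h0 h1
        rw [vA, pvIdx_nonneg_getD h0 h1]
      obtain ⟨c1, c2, c3, c4⟩ := ceil_spec r tails (pvIdx r (i : Int)) tails.length (-1)
        ((tails.length : Int) - 1) (by omega) (by omega) (by push_cast; omega) (by push_cast; omega)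
        (by intro h; omega)
        (by rw [hposA _ (by push_cast; omega) (by push_cast; omega)]
            have : ((tails.length : Int) - 1).toNat = tails.length - 1 := by omega
            rw [this]
            exact not_lt.mp hc2)
      set pos := getCeilIndexA r tails (-1) ((tails.length : Int) - 1) (pvIdx r (i : Int)) with hposdef
      show InvA r (i + 1) (PySem.List.pySetD tails pos (i : Int),
        PySem.List.pySetD prev (i : Int) (pvIdx tails (pos - 1)))
      have hpos1 : 1 ≤ pos := by
        by_contra hcon
        have hp0 : pos = 0 := by omega
        rw [hp0, hposA 0 (by norm_num) (by push_cast; omega)] at c3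
        simp only [Int.toNat_zero] at c3
        omega
      have hP1 : pos ≤ (tails.length : Int) - 1 := c2
      have hvP : vA r tails pos.toNat < pvIdx r (i : Int) := by
        rw [hposA pos (by omega) (by omega)] at c3
        exact lt_of_le_of_ne c3 (hvneq pos.toNat (by omega))
      have hvP1 : vA r tails (pos.toNat - 1) > pvIdx r (i : Int) := by
        have := c4 (by omega)
        rw [hposA (pos - 1) (by omega) (by omega)] at this
        have he : (pos - 1).toNat = pos.toNat - 1 := by omega
        rwa [he] at this
      have htP1 : pvIdx tails (pos - 1) = tails.getD (pos.toNat - 1) 0 := by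
        rw [pvIdx_nonneg_getD (by omega) (by omega)]
        congr 1
        omega
      obtain ⟨hlb0, hlb1⟩ := hbd (pos.toNat - 1) (by omega)
      have hprevlen : (i : Int) < prev.length := by push_cast [hplen]; omega
      have hpv : ∀ (v y : Int), 0 ≤ y →
          pvIdx (PySem.List.pySetD prev (i : Int) v) y = if y = (i : Int) then v else pvIdx prev y :=
        fun v y hy => pvIdx_pySetD (by positivity) hprevlen v y hy
      have hagree : ∀ (v : Int), ∀ y : Int, 0 ≤ y → y < (i : Int) →
          pvIdx prev y = pvIdx (PySem.List.pySetD prev (i : Int) v) y := by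
        intro v y hy0 hyi
        rw [hpv v y hy0, if_neg (by omega)]
      rw [pySetD_eq_set (by omega) (by omega)]
      have hT : ∀ j : Nat, j < tails.length → (tails.set pos.toNat (i : Int)).getD j 0 =
          if j = pos.toNat then (i : Int) else tails.getD j 0 := by
        intro j hj
        rw [getD_set_eq pos.toNat _ j hj]
        split <;> split <;> first | rfl | omega
      have hTv : ∀ j : Nat, j < tails.length → vA r (tails.set pos.toNat (i : Int)) j =
          if j = pos.toNat then pvIdx r (i : Int) else vA r tails j := by
        intro j hj
        rw [vA, hT j hj]
        split <;> rfl
      refine ⟨?_, ?_, ?_, ?_, ?_, ?_, ?_, ?_, ?_⟩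
      · simpa using hk1
      · intro j hj
        simp only [List.length_set] at hj
        rw [hT j hj]
        split
        · exact ⟨by positivity, by push_cast; omega⟩
        · obtain ⟨a, b⟩ := hbd j hj
          exact ⟨a, by push_cast; omega⟩
      · intro j1 j2 h12 hj2
        simp only [List.length_set] at hj2
        rw [hTv j1 (by omega), hTv j2 hj2]
        by_cases hj1P : j1 = pos.toNat
        · rw [if_pos hj1P, if_neg (by omega)]
          calc vA r tails j2 < vA r tails pos.toNat := hmono pos.toNat j2 (by omega) hj2
          _ < pvIdx r (i : Int) := hvP
        · rw [if_neg hj1P]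
          by_cases hj2P : j2 = pos.toNat
          · rw [if_pos hj2P]
            rcases eq_or_lt_of_le (show j1 ≤ pos.toNat - 1 by omega) with h | h
            · rw [h]; exact hvP1
            · exact lt_trans hvP1 (hmono j1 (pos.toNat - 1) h (by omega))
          · rw [if_neg hj2P]
            exact hmono j1 j2 h12 hj2
      · intro j hj
        simp only [List.length_set] at hj
        rw [hTv j hj]
        by_cases hjP : j = pos.toNat
        · rw [if_pos hjP]
          subst hjP
          obtain ⟨l, hs, hcl, hlen, hlast⟩ := hreal (pos.toNat - 1) (by omega)
          refine ⟨l ++ [r[i]], ?_, ?_, ?_, ?_⟩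
          · rw [htake]; exact List.Sublist.append hs (List.Sublist.refl _)
          · rw [List.isChain_append]
            refine ⟨hcl, List.isChain_singleton _, ?_⟩
            intro a ha b hb
            rw [hlast] at ha
            simp only [List.head?_cons, Option.mem_some_iff] at ha hb
            subst ha; subst hb
            rw [← hXr]
            exact hvP1
          · simp [hlen]; omega
          · rw [List.getLast?_concat, hXr]
        · rw [if_neg hjP]
          obtain ⟨l, hs, hcl, hlen, hlast⟩ := hreal j hj
          exact ⟨l, hs.trans (by rw [htake]; exact List.sublist_append_left _ _), hcl, hlen, hlast⟩
      · intro l hl hcl hlne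
        rw [htake] at hl
        rcases sublist_concat_cases hl with hold | ⟨l', rfl, hl'⟩
        · obtain ⟨ha, hb⟩ := hmax l hold hcl hlne
          have hlpos : 1 ≤ l.length := List.length_pos_iff.mpr hlne
          refine ⟨by simpa using ha, ?_⟩
          intro w hw
          rw [hTv (l.length - 1) (by omega)]
          split
          · rename_i hP
            have hwle := hb w hw
            rw [hP] at hwle
            exact le_trans hwle (le_of_lt hvP)
          · exact hb w hw
        · have hsp := List.isChain_append.mp hcl
          obtain ⟨hchl', -, hrel⟩ := hsp
          by_cases hne' : l' = []
          · subst hne'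
            simp only [List.nil_append, List.length_cons, List.length_nil]
            refine ⟨by simpa using hk1, ?_⟩
            intro w hw
            simp only [List.getLast?_singleton, Option.some_inj] at hw
            rw [hTv 0 (by omega), if_neg (by omega), ← hw, ← hXr]
            exact le_of_lt hXlt0
          · have hlast' := List.getLast?_eq_some_getLast hne'
            have hgt : l'.getLast hne' > r[i] :=
              hrel _ (by rw [hlast']; rfl) _ (by rfl)
            obtain ⟨hle', hb'⟩ := hmax l' hl' hchl' hne'
            have hl'pos : 1 ≤ l'.length := List.length_pos_iff.mpr hne'
            have hwle := hb' _ hlast'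
            -- the tail of l' exceeds x, so vA (l'.length - 1) > x, forcing l'.length - 1 < pos
            have hbig : vA r tails (l'.length - 1) > pvIdx r (i : Int) := by
              rw [hXr]
              omega
            have hlP : l'.length - 1 < pos.toNat := by
              by_contra hcon
              have hcon' : pos.toNat ≤ l'.length - 1 := by omega
              rcases eq_or_lt_of_le hcon' with h | h
              · rw [← h] at hbig
                omega
              · have := hmono pos.toNat (l'.length - 1) h (by omega)
                omega
            refine ⟨by simp; omega, ?_⟩
            intro w hw
            rw [List.getLast?_concat] at hw
            have hw' : w = r[i] := by simpa using hw.symm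
            subst hw'
            simp only [List.length_append, List.length_cons, List.length_nil]
            rw [(show l'.length + 1 - 1 = l'.length by omega), hTv l'.length (by omega)]
            by_cases hmP : l'.length = pos.toNat
            · rw [if_pos hmP, hXr]
            · rw [if_neg hmP]
              rw [← hXr]
              rcases eq_or_lt_of_le (show l'.length ≤ pos.toNat - 1 by omega) with h | h
              · rw [h]; exact le_of_lt hvP1
              · exact le_of_lt (lt_trans hvP1 (hmono l'.length (pos.toNat - 1) h (by omega)))
      · rw [length_pySetD]; exact hplen
      · intro y hy
        rw [hpv _ y hy]
        split
        · rename_i h; rw [h, htP1]; exact hlb1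
        · exact hwf y hy
      · intro y hy1 hy2
        rw [length_pySetD] at hy2
        rw [hpv _ y (by push_cast at hy1 ⊢; omega), if_neg (by push_cast at hy1 ⊢; omega)]
        exact hfresh y (by push_cast at hy1 ⊢; omega) hy2
      · intro j hj f hf
        simp only [List.length_set] at hj
        rw [hT j hj]
        by_cases hjP : j = pos.toNat
        · rw [if_pos hjP]
          subst hjP
          obtain ⟨f', rfl⟩ : ∃ f', f = f' + 1 := ⟨f - 1, by omega⟩
          have hstep : chainCountA (PySem.List.pySetD prev (i : Int) (pvIdx tails (pos - 1))) (f' + 1) (i : Int) =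
              chainCountA (PySem.List.pySetD prev (i : Int) (pvIdx tails (pos - 1))) f' (pvIdx (PySem.List.pySetD prev (i : Int) (pvIdx tails (pos - 1))) (i : Int)) + 1 := by
            simp [chainCountA, show (0:Int) ≤ (i : Int) by positivity]
          rw [hstep, hpv _ _ (by positivity), if_pos rfl, htP1]
          rw [← chainCountA_congr (hagree _) hwf f' _ hlb1]
          rw [hchain (pos.toNat - 1) (by omega) f' (by omega)]
          push_cast
          omega
        · rw [if_neg hjP]
          obtain ⟨a, b⟩ := hbd j hj
          rw [← chainCountA_congr (hagree _) hwf f _ b]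
          exact hchain j hj f (by omega)

theorem loopA_inv (r : List Int) (hnd : r.Nodup) (h2 : 2 ≤ r.length) :
    ∀ i : Nat, 1 ≤ i → i ≤ r.length →
    InvA r i ((PySem.List.pyRange 1 (i : Int)).foldl (lisStepA r)
      ([(0 : Int)], List.replicate (r.length + 1) (-1 : Int))) := by
  intro i
  induction i with
  | zero => omega
  | succ i ih =>
    intro h1 hle
    by_cases hi0 : i = 0
    · subst hi0
      rw [show ((0 : Nat) + 1 : Nat) = 1 from rfl]
      rw [show ((1 : Nat) : Int) = 1 by norm_num, PySem.List.pyRange_one_eq_nil (le_refl 1),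
        List.foldl_nil]
      have hr0 : pvIdx r 0 = r[0]'(by omega) := by
        rw [pvIdx_eq_getElem (le_refl 0) (by push_cast; omega)]
        simp
      have htk : r.take 1 = [r[0]'(by omega)] := by
        rcases r with - | ⟨a, t⟩
        · exact absurd h2 (by decide)
        · rfl
      refine ⟨by simp, ?_, ?_, ?_, ?_, by simp, ?_, ?_, ?_⟩
      · intro j hj
        simp only [List.length_cons, List.length_nil] at hj
        have : j = 0 := by omega
        subst this
        exact ⟨le_refl _, by norm_num⟩
      · intro j1 j2 h12 hj2
        simp only [List.length_cons, List.length_nil] at hj2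
        omega
      · intro j hj
        simp only [List.length_cons, List.length_nil] at hj
        have : j = 0 := by omega
        subst this
        refine ⟨[r[0]'(by omega)], by rw [htk], List.isChain_singleton _, by simp, ?_⟩
        simp only [List.getLast?_singleton, Option.some_inj]
        rw [vA]
        simp only [List.getD_cons_zero]
        exact hr0.symm
      · intro l hl hcl hlne
        rw [htk] at hl
        rcases List.sublist_singleton.mp hl with rfl | rfl
        · exact absurd rfl hlne
        · refine ⟨by simp, ?_⟩
          intro w hw
          simp only [List.getLast?_singleton, Option.some_inj] at hw
          have h0 : ([r[0]'(by omega)] : List Int).length - 1 = 0 := by simp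
          rw [h0, vA]
          simp only [List.getD_cons_zero]
          rw [← hw, hr0]
      · intro y hy
        by_cases hyr : y < ((r.length + 1 : Nat) : Int)
        · rw [pvIdx_replicate hy hyr]; omega
        · rw [pvIdx_oob (by simpa using not_lt.mp hyr)]
          push_cast at hyr
          omega
      · intro y hy1 hy2
        simp only [List.length_replicate] at hy2
        rw [pvIdx_replicate (by omega) (by push_cast at hy2 ⊢; omega)]
        omega
      · intro j hj f hf
        simp only [List.length_cons, List.length_nil] at hj
        have : j = 0 := by omega
        subst this
        simp only [List.getD_cons_zero]
        obtain ⟨f', rfl⟩ : ∃ f', f = f' + 1 := ⟨f - 1, by omega⟩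
        have hm1 : pvIdx (List.replicate (r.length + 1) (-1 : Int)) 0 = -1 :=
          pvIdx_replicate (le_refl 0) (by push_cast; omega)
        simp [chainCountA, hm1, chainCountA_neg (show (-1 : Int) < 0 by norm_num)]
    · have hInv := ih (by omega) (by omega)
      have hsplit : PySem.List.pyRange 1 ((i + 1 : Nat) : Int) =
          PySem.List.pyRange 1 (i : Int) ++ [(i : Int)] := by
        push_cast
        exact PySem.List.pyRange_one_succ_right (by push_cast; omega)
      rw [hsplit, List.foldl_append, List.foldl_cons, List.foldl_nil]
      exact stepA_preserves r hnd i (by omega) (by omega) _ hInv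

theorem LIS_singleton (a : Int) : LIS [a] = 1 := by
  apply le_antisymm
  · obtain ⟨l, hs, -, hlen⟩ := LIS_attain [a]
    rw [← hlen]
    have := hs.length_le
    simpa using this
  · have := length_le_LIS (List.Sublist.refl [a]) (List.isChain_singleton a)
    simpa using this

theorem lisPatienceA_eq_LIS (p : List Int) (hnd : p.Nodup) : lisPatienceA p = (LIS p : Int) := by
  rw [lisPatienceA]
  by_cases hlen : p.length ≤ 1
  · rw [if_pos hlen]
    rcases p with - | ⟨a, t⟩
    · decide
    · rcases t with - | ⟨b, t'⟩
      · rw [LIS_singleton]; rfl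
      · simp at hlen
  · rw [if_neg hlen]
    have h2 : 2 ≤ p.reverse.length := by simp; omega
    have hndr : p.reverse.Nodup := by simpa using hnd
    have hInv := loopA_inv p.reverse hndr h2 p.reverse.length (by omega) (le_refl _)
    obtain ⟨hk1, hbd, hmono, hreal, hmax, hplen, hwf, hfresh, hchain⟩ := hInv
    set st := (PySem.List.pyRange 1 ((p.reverse.length : Nat) : Int)).foldl (lisStepA p.reverse)
      ([(0 : Int)], List.replicate (p.reverse.length + 1) (-1 : Int)) with hst
    show chainCountA st.2 st.2.length (pvIdx st.1 (-1)) = (LIS p : Int)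
    have hne : st.1 ≠ [] := by
      intro h; rw [h] at hk1; simp at hk1
    rw [pvIdx_neg_one hne]
    have hfuel : p.reverse.length < st.2.length := by omega
    have hres := hchain (st.1.length - 1) (by omega) st.2.length hfuel
    rw [hres]
    -- the number of piles equals the longest strictly decreasing subsequence of p.reverse
    have hge : st.1.length ≤ LDS p.reverse := by
      obtain ⟨l, hs, hcl, hlen2, -⟩ := hreal (st.1.length - 1) (by omega)
      have := length_le_LDS (hs.trans (by rw [List.take_length])) hcl
      omega
    have hle2 : LDS p.reverse ≤ st.1.length := by
      obtain ⟨l, hs, hcl, hlen2⟩ := LDS_attain p.reverse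
      rcases eq_or_ne l [] with rfl | hlne
      · simp at hlen2; omega
      · obtain ⟨ha, -⟩ := hmax l (by rwa [List.take_length]) hcl hlne
        omega
    rw [LIS_eq_LDS_reverse]
    have : LDS p.reverse = st.1.length := by omega
    rw [this]
    push_cast
    omega

-- ---------- B side: the quadratic DP ----------
-- value of the DP cell j: longest strictly increasing subsequence of p.take (j+1) ending at position j
def EB (p : List Int) (j : Nat) : Nat :=
  natMax (((p.take j).sublists.filter (fun l => ltChainB (l ++ [p.getD j 0]))).map (fun l => l.length + 1))

theorem EB_pos (p : List Int) (j : Nat) : 1 ≤ EB p j := by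
  apply le_natMax
  have : ([] : List Int) ∈ (p.take j).sublists.filter (fun l => ltChainB (l ++ [p.getD j 0])) := by
    simp [List.mem_filter, ltChainB]
  exact List.mem_map.mpr ⟨[], this, rfl⟩

theorem mem_le_EB {p : List Int} {i : Nat} {l : List Int}
    (hs : l.Sublist (p.take i)) (hc : ltChainB (l ++ [p.getD i 0]) = true) :
    l.length + 1 ≤ EB p i := by
  apply le_natMax
  exact List.mem_map.mpr ⟨l, List.mem_filter.mpr ⟨List.mem_sublists.mpr hs, hc⟩, rfl⟩

theorem EB_attain (p : List Int) (i : Nat) :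
    ∃ l : List Int, l.Sublist (p.take i) ∧ ltChainB (l ++ [p.getD i 0]) = true ∧ l.length + 1 = EB p i := by
  rcases natMax_attain ((((p.take i).sublists.filter (fun l => ltChainB (l ++ [p.getD i 0]))).map (fun l => l.length + 1))) with h | h
  · have := EB_pos p i
    rw [EB] at this ⊢
    omega
  · obtain ⟨l, hl, hlen⟩ := List.mem_map.mp h
    obtain ⟨hs, hch⟩ := List.mem_filter.mp hl
    exact ⟨l, List.mem_sublists.mp hs, hch, hlen⟩

-- extending the chain ending at j by the element at i
theorem EB_step_le {p : List Int} {j i : Nat} (hj : j < i) (hi : i < p.length)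
    (hlt : p[j]'(by omega) < p[i]) : EB p j + 1 ≤ EB p i := by
  obtain ⟨l, hs, hc, hlen⟩ := EB_attain p j
  have hgd : p.getD j 0 = p[j]'(by omega) := List.getD_eq_getElem p 0 (by omega)
  have hsub : (l ++ [p.getD j 0]).Sublist (p.take i) := by
    have h1 : (l ++ [p.getD j 0]).Sublist (p.take j ++ [p.getD j 0]) :=
      List.Sublist.append hs (List.Sublist.refl _)
    have h2 : p.take j ++ [p.getD j 0] = p.take (j + 1) := by
      rw [List.take_add_one, hgd]
      simp [List.getElem?_eq_getElem (show j < p.length by omega)]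
    rw [h2] at h1
    exact h1.trans (List.take_sublist_take_left (by omega))
  have hch : ltChainB ((l ++ [p.getD j 0]) ++ [p.getD i 0]) = true := by
    rw [ltChainB_iff, List.isChain_append]
    refine ⟨(ltChainB_iff _).mp hc, List.isChain_singleton _, ?_⟩
    intro x hx y hy
    rw [List.getLast?_concat] at hx
    simp only [List.head?_cons, Option.mem_some_iff] at hx hy
    subst hx; subst hy
    rw [hgd, List.getD_eq_getElem p 0 hi]
    exact hlt
  have := mem_le_EB hsub hch
  simp at this
  omega

theorem loopB_inv (p : List Int) :
    ∀ i : Nat, i ≤ p.length →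
    ((p.take i).foldl (dpStepB p) []).length = i ∧
    ∀ j : Nat, j < i → ((p.take i).foldl (dpStepB p) []).getD j 0 = (EB p j : Int) := by
  intro i
  induction i with
  | zero => simp
  | succ i ih =>
    intro hle
    have hi : i < p.length := by omega
    obtain ⟨hlen, hval⟩ := ih (by omega)
    have htake : p.take (i + 1) = p.take i ++ [p[i]] := by
      rw [List.take_add_one]
      simp [List.getElem?_eq_getElem hi]
    rw [htake, List.foldl_append]
    set best := (p.take i).foldl (dpStepB p) [] with hbest
    simp only [List.foldl_cons, List.foldl_nil]
    rw [dpStepB]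
    set C := ((best.zip p).filter (fun q => decide (q.2 < p[i]))).map (fun q => q.1) with hC
    set M := (PySem.List.max? C (fun y => y)).getD 0 with hM
    have hmemC : ∀ c : Int, c ∈ C ↔ ∃ j : Nat, j < i ∧ p.getD j 0 < p[i] ∧ c = (EB p j : Int) := by
      intro c
      constructor
      · intro hc
        obtain ⟨q, hq, hq1⟩ := List.mem_map.mp hc
        obtain ⟨hqz, hqlt⟩ := List.mem_filter.mp hq
        obtain ⟨j, hjlt, hjq⟩ := List.mem_iff_getElem.mp hqz
        have hjlt' : j < i := by
          have := List.length_zip (l₁ := best) (l₂ := p)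
          omega
        have hjp : j < p.length := by omega
        rw [List.getElem_zip] at hjq
        refine ⟨j, hjlt', ?_, ?_⟩
        · have : q.2 = p[j] := by rw [← hjq]
          rw [List.getD_eq_getElem p 0 hjp, ← this]
          simpa using hqlt
        · have h1 : q.1 = best[j]'(by omega) := by rw [← hjq]
          have h2 : best.getD j 0 = best[j]'(by omega) := List.getD_eq_getElem best 0 (by omega)
          rw [← hq1, h1, ← h2, hval j hjlt']
      · rintro ⟨j, hj, hlt, rfl⟩
        have hjp : j < p.length := by omega
        apply List.mem_map.mpr
        refine ⟨(best[j]'(by omega), p[j]), ?_, ?_⟩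
        · apply List.mem_filter.mpr
          constructor
          · apply List.mem_iff_getElem.mpr
            refine ⟨j, ?_, ?_⟩
            · rw [List.length_zip]; omega
            · rw [List.getElem_zip]
          · rw [List.getD_eq_getElem p 0 hjp] at hlt
            simpa using hlt
        · have h2 : best.getD j 0 = best[j]'(by omega) := List.getD_eq_getElem best 0 (by omega)
          rw [← h2, hval j hj]
    have hMge : ∀ j : Nat, j < i → p.getD j 0 < p[i] → (EB p j : Int) ≤ M := by
      intro j hj hlt
      have hcm : ((EB p j : Nat) : Int) ∈ C := (hmemC _).mpr ⟨j, hj, hlt, rfl⟩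
      cases hmx : PySem.List.max? C (fun y => y) with
      | none =>
        rw [PySem.List.max?_eq_none_iff] at hmx
        rw [hmx] at hcm
        cases hcm
      | some m =>
        have := PySem.List.max?_isMax hmx _ hcm
        simpa [hM, hmx] using this
    have hMcase : M = 0 ∨ ∃ j : Nat, j < i ∧ p.getD j 0 < p[i] ∧ M = (EB p j : Int) := by
      cases hmx : PySem.List.max? C (fun y => y) with
      | none => left; rw [hM, hmx]; rfl
      | some m =>
        right
        have hm : m ∈ C := PySem.List.max?_mem hmx
        obtain ⟨j, hj, hlt, hme⟩ := (hmemC m).mp hm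
        exact ⟨j, hj, hlt, by rw [hM, hmx, Option.getD_some, hme]⟩
    have hkey : 1 + M = (EB p i : Int) := by
      have h1 : 1 + M ≤ (EB p i : Int) := by
        rcases hMcase with h0 | ⟨j, hj, hlt, hMe⟩
        · have := EB_pos p i; omega
        · rw [List.getD_eq_getElem p 0 (by omega)] at hlt
          have := EB_step_le hj hi hlt; omega
      have h2 : (EB p i : Int) ≤ 1 + M := by
        obtain ⟨l, hs, hc, hlen2⟩ := EB_attain p i
        rcases List.eq_nil_or_concat l with rfl | ⟨l'', x, rfl⟩
        · have hM0 : 0 ≤ M := by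
            rcases hMcase with h0 | ⟨j, hj, hlt, hMe⟩ <;> omega
          simp at hlen2
          omega
        · rw [List.concat_eq_append] at hs hc hlen2
          obtain ⟨j, hjlen, hx, hl''⟩ := sublist_concat_decomp hs
          have hjlt : j < i := by
            have := List.length_take_of_le (show i ≤ p.length by omega) (l := p)
            omega
          have hxp : p[j]'(by omega) = x := by rw [← hx, List.getElem_take]
          have hl''' : l''.Sublist (p.take j) := by
            rw [List.take_take, min_eq_left (by omega)] at hl''
            exact hl''
          have hcc := (ltChainB_iff _).mp hc
          rw [List.isChain_append] at hcc
          obtain ⟨hcl, -, hrel⟩ := hcc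
          have hxlt : x < p[i] := by
            have := hrel x (by rw [List.getLast?_concat]; rfl) (p.getD i 0) (by rfl)
            rwa [List.getD_eq_getElem p 0 hi] at this
          have hmle : l''.length + 1 ≤ EB p j := by
            apply mem_le_EB hl'''
            rw [ltChainB_iff]
            have : p.getD j 0 = x := by rw [List.getD_eq_getElem p 0 (by omega), hxp]
            rw [this]
            exact hcl
          have := hMge j hjlt (by rw [List.getD_eq_getElem p 0 (by omega), hxp]; exact hxlt)
          simp at hlen2
          omega
      omega
    refine ⟨by simp [hlen], ?_⟩
    intro j hj
    by_cases hji : j < i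
    · rw [List.getD_append _ _ _ _ (by omega)]
      exact hval j hji
    · have hj' : j = i := by omega
      subst hj'
      rw [List.getD_eq_getElem _ _ (by simp [hlen])]
      rw [List.getElem_append_right (by omega)]
      simp [hlen, hkey]

theorem dpB_eq_LIS (p : List Int) :
    (PySem.List.max? (p.foldl (dpStepB p) []) (fun y => y)).getD 0 = (LIS p : Int) := by
  obtain ⟨hlen, hval⟩ := loopB_inv p p.length (le_refl _)
  rw [List.take_length] at hlen hval
  cases hmx : PySem.List.max? (p.foldl (dpStepB p) []) (fun y => y) with
  | none =>
    rw [PySem.List.max?_eq_none_iff] at hmx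
    rw [hmx] at hlen
    have hp : p = [] := List.eq_nil_of_length_eq_zero hlen.symm
    subst hp
    simp [LIS, natMax, ltChainB]
  | some m =>
    have hm := PySem.List.max?_mem hmx
    obtain ⟨j, hjlen, hjm⟩ := List.mem_iff_getElem.mp hm
    have hj : j < p.length := by omega
    have hbj : m = (EB p j : Int) := by
      rw [← hjm, ← List.getD_eq_getElem _ 0 hjlen, hval j hj]
    simp only [Option.getD_some]
    have h1 : m ≤ (LIS p : Int) := by
      obtain ⟨l, hs, hc, hlen2⟩ := EB_attain p j
      have hsub : (l ++ [p.getD j 0]).Sublist p := by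
        have heq : p.take j ++ [p.getD j 0] = p.take (j + 1) := by
          rw [List.take_add_one, List.getD_eq_getElem p 0 hj]
          simp [List.getElem?_eq_getElem hj]
        have h3 : (l ++ [p.getD j 0]).Sublist (p.take (j + 1)) := by
          rw [← heq]
          exact List.Sublist.append hs (List.Sublist.refl _)
        exact h3.trans (List.take_sublist _ _)
      have := length_le_LIS hsub ((ltChainB_iff _).mp hc)
      simp at this
      omega
    have h2 : (LIS p : Int) ≤ m := by
      obtain ⟨l, hs, hc, hlen2⟩ := LIS_attain p
      rcases List.eq_nil_or_concat l with rfl | ⟨l'', x, rfl⟩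
      · have := EB_pos p j
        simp at hlen2
        omega
      · rw [List.concat_eq_append] at hs hc hlen2
        obtain ⟨j', hj'len, hx, hl''⟩ := sublist_concat_decomp hs
        have hch : ltChainB (l'' ++ [p.getD j' 0]) = true := by
          rw [ltChainB_iff]
          have hgd : p.getD j' 0 = x := by rw [List.getD_eq_getElem p 0 hj'len, hx]
          rw [hgd]
          exact hc
        have hEB := mem_le_EB hl'' hch
        have hle := PySem.List.max?_isMax hmx ((p.foldl (dpStepB p) [])[j']'(by omega)) (List.getElem_mem _)
        have hval' : (p.foldl (dpStepB p) [])[j']'(by omega) = (EB p j' : Int) := by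
          rw [← List.getD_eq_getElem _ 0 (by omega), hval j' hj'len]
        rw [hval'] at hle
        simp at hlen2
        omega
    omega

-- ---------- preprocessing: perm has no duplicates under Pre_ ----------
theorem goalpos_get?_mem {l : List (Int × Int)} {d : PySem.Dict Int Int} {k v : Int}
    (h : (l.foldl (fun d p => d.insert p.2 p.1) d).get? k = some v) :
    (v, k) ∈ l ∨ d.get? k = some v := by
  induction l generalizing d with
  | nil => exact Or.inr h
  | cons p t ih =>
    rcases ih h with hm | hd
    · exact Or.inl (List.mem_cons_of_mem _ hm)
    · by_cases hk : k = p.2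
      · subst hk
        rw [PySem.Dict.get?_insert_self] at hd
        exact Or.inl (by simp [← Option.some_inj.mp hd])
      · rw [PySem.Dict.get?_insert_of_ne _ _ hk] at hd
        exact Or.inr hd

theorem goalpos_get?_total {l : List (Int × Int)} {d : PySem.Dict Int Int} {k : Int}
    (h : (l.foldl (fun d p => d.insert p.2 p.1) d).get? k = none) :
    d.get? k = none ∧ k ∉ l.map (·.2) := by
  induction l generalizing d with
  | nil => exact ⟨h, by simp⟩
  | cons p t ih =>
    obtain ⟨h1, h2⟩ := ih h
    by_cases hk : k = p.2
    · subst hk; rw [PySem.Dict.get?_insert_self] at h1; cases h1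
    · rw [PySem.Dict.get?_insert_of_ne _ _ hk] at h1
      exact ⟨h1, by simpa [hk] using h2⟩

theorem perm_nodup (line_puzzle line_goal : List Int) (hpre : Pre_line_conflicts_py line_puzzle line_goal) :
    ((line_puzzle.filter (fun n => PySem.Set.contains (PySem.Set.discard (PySem.Set.inter (PySem.Set.ofList line_puzzle) (PySem.Set.ofList line_goal)) 0) n)).map
      (fun n => (PySem.Dict.get? ((PySem.List.enumerate (line_goal.filter (fun n => PySem.Set.contains (PySem.Set.discard (PySem.Set.inter (PySem.Set.ofList line_puzzle) (PySem.Set.ofList line_goal)) 0) n)) 0).foldl (fun d p => d.insert p.2 p.1) (PySem.Dict.empty)) n).getD 0)).Nodup := by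
  set S := PySem.Set.discard (PySem.Set.inter (PySem.Set.ofList line_puzzle) (PySem.Set.ofList line_goal)) 0 with hS
  have hmem : ∀ n : Int, S.contains n = true ↔ (n ∈ line_puzzle ∧ n ∈ line_goal ∧ n ≠ 0) := by
    intro n
    rw [PySem.Set.contains_iff, hS, PySem.Set.mem_discard, PySem.Set.mem_inter,
      PySem.Set.mem_ofList, PySem.Set.mem_ofList]
    tauto
  set lp2 := line_puzzle.filter (fun n => S.contains n) with hlp2
  set lg2 := line_goal.filter (fun n => S.contains n) with hlg2
  set gp := (PySem.List.enumerate lg2 0).foldl (fun d p => d.insert p.2 p.1) (PySem.Dict.empty) with hgp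
  -- lp2 coincides with the filter used in Pre_, hence is duplicate-free
  have hnd2 : lp2.Nodup := by
    have : lp2 = line_puzzle.filter (fun n => decide (n ≠ 0 ∧ n ∈ line_goal)) := by
      apply List.filter_congr
      intro n hn
      rw [Bool.eq_iff_iff, hmem, decide_eq_true_eq]
      tauto
    rw [this]; exact hpre
  -- every element of lp2 occurs in lg2
  have hsub : ∀ n ∈ lp2, n ∈ lg2 := by
    intro n hn
    rw [hlp2, List.mem_filter] at hn
    rw [hlg2, List.mem_filter]
    exact ⟨((hmem n).mp hn.2).2.1, hn.2⟩
  -- the goal-position lookup is defined and injective on lg2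
  have htot : ∀ n ∈ lg2, ∃ i, gp.get? n = some i := by
    intro n hn
    cases hget : gp.get? n with
    | some i => exact ⟨i, rfl⟩
    | none =>
      obtain ⟨-, habs⟩ := goalpos_get?_total hget
      rw [PySem.List.map_snd_enumerate] at habs
      exact absurd hn habs
  have hatpos : ∀ (n i : Int), gp.get? n = some i →
      ∃ k : Nat, ∃ hk : k < lg2.length, i = (k : Int) ∧ n = lg2[k] := by
    intro n i hget
    rcases goalpos_get?_mem hget with hm | hm
    · rw [PySem.List.mem_enumerate_iff] at hm
      obtain ⟨k, hk, hpk⟩ := hm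
      refine ⟨k, hk, ?_, ?_⟩
      · have := congrArg Prod.fst hpk; simpa using this
      · have := congrArg Prod.snd hpk; simpa using this
    · rw [PySem.Dict.get?_empty] at hm; cases hm
  apply List.Nodup.map_on _ hnd2
  intro n1 hn1 n2 hn2 heq
  obtain ⟨i1, hg1⟩ := htot n1 (hsub n1 hn1)
  obtain ⟨i2, hg2⟩ := htot n2 (hsub n2 hn2)
  rw [hg1, hg2] at heq
  simp only [Option.getD_some] at heq
  subst heq
  obtain ⟨k1, hk1, hik1, hnk1⟩ := hatpos n1 i1 hg1
  obtain ⟨k2, hk2, hik2, hnk2⟩ := hatpos n2 i1 hg2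
  have hk : k1 = k2 := by omega
  subst hk
  rw [hnk1, hnk2]

-- ===== VERDICT (by name: the statement is the Claim_ definition above) =====
theorem ports_agree_on_perm (perm : List Int) (hnd : perm.Nodup) :
    (perm.length : Int) - lisPatienceA perm =
    (perm.length : Int) - (PySem.List.max? (perm.foldl (dpStepB perm) []) (fun y => y)).getD 0 := by
  rw [lisPatienceA_eq_LIS _ hnd, dpB_eq_LIS]

theorem line_conflicts_py_spec : Claim_equal_line_conflicts_py := by
  intro line_puzzle line_goal _hdom hpre
  unfold Spec_line_conflicts_py line_conflicts_py line_conflicts_py_alt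
  dsimp only
  exact ports_agree_on_perm _ (perm_nodup line_puzzle line_goal hpre)
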